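-- pv_equiv track=rewrite | github.com/parkpow/deep-license-plate-recognition | webhooks/webhook_tester/front_rear_tester.py | find_camera_pairs
-- ===== SOURCE A (Python) =====
-- from typing import Any
--
-- def find_camera_pairs(config: dict[str, Any]) -> dict[str, dict[str, str] | None]:
--     """Find and return all configured camera pairs."""
--     pairs = config.get("camera_pairs", [])
--
--     return {
--         "normal_pair": next(
--             (
--                 p
--                 for p in pairs
--                 if p.get("front") == "camera-front" and p.get("rear") == "camera-rear"
--             ),
--             None,
--         ),
--         "solo_front": next(
--             (
--                 p
--                 for p in pairs
--                 if p.get("front") == "camera-solo-front" and not p.get("rear")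
--             ),
--             None,
--         ),
--         "solo_rear": next(
--             (
--                 p
--                 for p in pairs
--                 if not p.get("front") and p.get("rear") == "camera-solo-rear"
--             ),
--             None,
--         ),
--         "failed_front": next(
--             (
--                 p
--                 for p in pairs
--                 if p.get("front") == "camera-failed-front"
--                 and p.get("rear") == "camera-working-rear"
--             ),
--             None,
--         ),
--         "failed_rear": next(
--             (
--                 p
--                 for p in pairs
--                 if p.get("front") == "camera-working-front"
--                 and p.get("rear") == "camera-failed-rear"
--             ),
--             None,
--         ),
--     }
-- ===== SOURCE B (Python) =====
-- def _categorize(p):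
--     front, rear = p.get("front"), p.get("rear")
--     if front == "camera-front" and rear == "camera-rear":
--         return "normal_pair"
--     if front == "camera-solo-front" and not rear:
--         return "solo_front"
--     if not front and rear == "camera-solo-rear":
--         return "solo_rear"
--     if front == "camera-failed-front" and rear == "camera-working-rear":
--         return "failed_front"
--     if front == "camera-working-front" and rear == "camera-failed-rear":
--         return "failed_rear"
--     return None
--
--
-- def find_camera_pairs(config):
--     """Find and return all configured camera pairs (single pass, alternative decomposition)."""
--     result = {
--         "normal_pair": None,
--         "solo_front": None,
--         "solo_rear": None,
--         "failed_front": None,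
--         "failed_rear": None,
--     }
--     for p in config.get("camera_pairs", []):
--         key = _categorize(p)
--         if key is not None and result[key] is None:
--             result[key] = p
--     return result
-- ===== Notes on version B (the rewrite author's own statement) =====
-- stated objective: alternative
-- what changed: Replaces five independent next(...) scans of the pair list by a single pass that classifies each pair once and fills a preinitialized result dict under a first-match None guard.
import Mathlib
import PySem

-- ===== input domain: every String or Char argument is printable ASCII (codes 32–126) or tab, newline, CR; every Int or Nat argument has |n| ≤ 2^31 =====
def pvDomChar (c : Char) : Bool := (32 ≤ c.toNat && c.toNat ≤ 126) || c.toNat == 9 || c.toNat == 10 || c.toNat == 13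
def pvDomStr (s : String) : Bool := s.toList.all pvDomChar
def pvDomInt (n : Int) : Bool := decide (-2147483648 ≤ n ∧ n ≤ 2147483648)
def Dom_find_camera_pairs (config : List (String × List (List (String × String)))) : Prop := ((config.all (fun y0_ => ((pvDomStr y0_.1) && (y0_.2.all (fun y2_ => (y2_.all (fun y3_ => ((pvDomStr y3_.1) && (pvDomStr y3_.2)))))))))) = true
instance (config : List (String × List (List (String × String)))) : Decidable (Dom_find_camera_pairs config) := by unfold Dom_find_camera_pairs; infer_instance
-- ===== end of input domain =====

-- B replaces A's five separate next(...) scans over the pair list by one pass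
-- that classifies each pair once and fills a preinitialized dict (objective: alternative).

-- ===== PORT A =====
-- p.get(k) for a pair dict (None when absent)
def pvGet (p : List (String × String)) (k : String) : Option String :=
  (PySem.Dict.mk p).get? k

-- Python truthiness of p.get(k): falsy iff None or ""
def pvFalsy (o : Option String) : Bool :=
  match o with
  | none => true
  | some s => s == ""

def find_camera_pairs (config : List (String × List (List (String × String)))) : List (String × Option (List (String × String))) :=
  let pairs := (PySem.Dict.mk config).getD "camera_pairs" []
  [("normal_pair",
      pairs.find? (fun p => pvGet p "front" == some "camera-front" && pvGet p "rear" == some "camera-rear")),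
   ("solo_front",
      pairs.find? (fun p => pvGet p "front" == some "camera-solo-front" && pvFalsy (pvGet p "rear"))),
   ("solo_rear",
      pairs.find? (fun p => pvFalsy (pvGet p "front") && pvGet p "rear" == some "camera-solo-rear")),
   ("failed_front",
      pairs.find? (fun p => pvGet p "front" == some "camera-failed-front" && pvGet p "rear" == some "camera-working-rear")),
   ("failed_rear",
      pairs.find? (fun p => pvGet p "front" == some "camera-working-front" && pvGet p "rear" == some "camera-failed-rear"))]

-- ===== PORT B =====
def fcpCategorize (p : List (String × String)) : Option String :=
  let front := pvGet p "front"
  let rear := pvGet p "rear"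
  if front == some "camera-front" && rear == some "camera-rear" then some "normal_pair"
  else if front == some "camera-solo-front" && pvFalsy rear then some "solo_front"
  else if pvFalsy front && rear == some "camera-solo-rear" then some "solo_rear"
  else if front == some "camera-failed-front" && rear == some "camera-working-rear" then some "failed_front"
  else if front == some "camera-working-front" && rear == some "camera-failed-rear" then some "failed_rear"
  else none

-- one iteration of B's loop ('result[key]' never misses: the five keys are preinitialized)
def fcpStep (res : PySem.Dict String (Option (List (String × String)))) (p : List (String × String)) :
    PySem.Dict String (Option (List (String × String))) :=
  match fcpCategorize p with
  | some k => if res.getD k none = none then res.insert k (some p) else res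
  | none => res

def find_camera_pairs_alt (config : List (String × List (List (String × String)))) : List (String × Option (List (String × String))) :=
  let pairs := (PySem.Dict.mk config).getD "camera_pairs" []
  let init : PySem.Dict String (Option (List (String × String))) :=
    PySem.Dict.mk [("normal_pair", none), ("solo_front", none), ("solo_rear", none), ("failed_front", none), ("failed_rear", none)]
  (pairs.foldl fcpStep init).items

-- ===== PRECONDITION & SPEC =====
def Spec_find_camera_pairs (config : List (String × List (List (String × String)))) (out : List (String × Option (List (String × String)))) : Prop := out = find_camera_pairs_alt config
instance (config : List (String × List (List (String × String)))) (out : List (String × Option (List (String × String)))) : Decidable (Spec_find_camera_pairs config out) := by unfold Spec_find_camera_pairs; infer_instance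

-- ===== CLAIM (what is proved, stated in full; the proofs are below) =====
def Claim_equal_find_camera_pairs : Prop := ∀ (config : List (String × List (List (String × String)))), Dom_find_camera_pairs config → Spec_find_camera_pairs config (find_camera_pairs config)

-- ===== LEMMAS AND PROOFS =====

-- 'o if o is not None else x' (how a filled slot shadows later matches)
def orE (o x : Option (List (String × String))) : Option (List (String × String)) :=
  match o with
  | none => x
  | some _ => o

theorem orE_none (x : Option (List (String × String))) : orE none x = x := rfl

theorem orE_none_right (o : Option (List (String × String))) : orE o none = o := by
  cases o <;> rfl

-- the five mutually exclusive conditions, named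
def fcpC1 (p : List (String × String)) : Bool := pvGet p "front" == some "camera-front" && pvGet p "rear" == some "camera-rear"
def fcpC2 (p : List (String × String)) : Bool := pvGet p "front" == some "camera-solo-front" && pvFalsy (pvGet p "rear")
def fcpC3 (p : List (String × String)) : Bool := pvFalsy (pvGet p "front") && pvGet p "rear" == some "camera-solo-rear"
def fcpC4 (p : List (String × String)) : Bool := pvGet p "front" == some "camera-failed-front" && pvGet p "rear" == some "camera-working-rear"
def fcpC5 (p : List (String × String)) : Bool := pvGet p "front" == some "camera-working-front" && pvGet p "rear" == some "camera-failed-rear"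

-- fcpCategorize is the if-chain over the five named conditions (definitional)
theorem categorize_eq (p : List (String × String)) :
    fcpCategorize p =
      (if fcpC1 p then some "normal_pair"
       else if fcpC2 p then some "solo_front"
       else if fcpC3 p then some "solo_rear"
       else if fcpC4 p then some "failed_front"
       else if fcpC5 p then some "failed_rear"
       else none) := rfl

theorem pvFalsy_iff (o : Option String) : pvFalsy o = true ↔ o = none ∨ o = some "" := by
  cases o with
  | none => simp [pvFalsy]
  | some s => simp [pvFalsy]

-- the five conditions are mutually exclusive (distinct, non-falsy 'front' values)
theorem excl1 (p : List (String × String)) (h : fcpC1 p = true) :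
    fcpC2 p = false ∧ fcpC3 p = false ∧ fcpC4 p = false ∧ fcpC5 p = false := by
  simp only [fcpC1, Bool.and_eq_true, beq_iff_eq] at h
  simp [fcpC2, fcpC3, fcpC4, fcpC5, h.1, h.2, pvFalsy]

theorem excl2 (p : List (String × String)) (h : fcpC2 p = true) :
    fcpC1 p = false ∧ fcpC3 p = false ∧ fcpC4 p = false ∧ fcpC5 p = false := by
  simp only [fcpC2, Bool.and_eq_true, beq_iff_eq] at h
  rcases (pvFalsy_iff _).mp h.2 with hr | hr <;>
    simp [fcpC1, fcpC3, fcpC4, fcpC5, h.1, hr, pvFalsy]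

theorem excl3 (p : List (String × String)) (h : fcpC3 p = true) :
    fcpC1 p = false ∧ fcpC2 p = false ∧ fcpC4 p = false ∧ fcpC5 p = false := by
  simp only [fcpC3, Bool.and_eq_true, beq_iff_eq] at h
  rcases (pvFalsy_iff _).mp h.1 with hf | hf <;>
    simp [fcpC1, fcpC2, fcpC4, fcpC5, h.2, hf, pvFalsy]

theorem excl4 (p : List (String × String)) (h : fcpC4 p = true) :
    fcpC1 p = false ∧ fcpC2 p = false ∧ fcpC3 p = false ∧ fcpC5 p = false := by
  simp only [fcpC4, Bool.and_eq_true, beq_iff_eq] at h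
  simp [fcpC1, fcpC2, fcpC3, fcpC5, h.1, h.2, pvFalsy]

-- the category fcpCategorize assigns under each condition
theorem cat1 (p : List (String × String)) (h : fcpC1 p = true) :
    fcpCategorize p = some "normal_pair" := by
  rw [categorize_eq]; simp [h]

theorem cat2 (p : List (String × String)) (h1 : fcpC1 p = false) (h : fcpC2 p = true) :
    fcpCategorize p = some "solo_front" := by
  rw [categorize_eq]; simp [h1, h]

theorem cat3 (p : List (String × String)) (h1 : fcpC1 p = false) (h2 : fcpC2 p = false) (h : fcpC3 p = true) :
    fcpCategorize p = some "solo_rear" := by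
  rw [categorize_eq]; simp [h1, h2, h]

theorem cat4 (p : List (String × String)) (h1 : fcpC1 p = false) (h2 : fcpC2 p = false) (h3 : fcpC3 p = false) (h : fcpC4 p = true) :
    fcpCategorize p = some "failed_front" := by
  rw [categorize_eq]; simp [h1, h2, h3, h]

theorem cat5 (p : List (String × String)) (h1 : fcpC1 p = false) (h2 : fcpC2 p = false) (h3 : fcpC3 p = false) (h4 : fcpC4 p = false) (h : fcpC5 p = true) :
    fcpCategorize p = some "failed_rear" := by
  rw [categorize_eq]; simp [h1, h2, h3, h4, h]

theorem cat0 (p : List (String × String)) (h1 : fcpC1 p = false) (h2 : fcpC2 p = false)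
    (h3 : fcpC3 p = false) (h4 : fcpC4 p = false) (h5 : fcpC5 p = false) :
    fcpCategorize p = none := by
  rw [categorize_eq]; simp [h1, h2, h3, h4, h5]

-- how one loop iteration transforms the literal five-slot state, per category
theorem step1 (p : List (String × String)) (o1 o2 o3 o4 o5 : Option (List (String × String)))
    (h : fcpC1 p = true) :
    fcpStep (PySem.Dict.mk [("normal_pair", o1), ("solo_front", o2), ("solo_rear", o3), ("failed_front", o4), ("failed_rear", o5)]) p
    = PySem.Dict.mk [("normal_pair", orE o1 (some p)), ("solo_front", o2), ("solo_rear", o3), ("failed_front", o4), ("failed_rear", o5)] := by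
  simp only [fcpStep, cat1 p h]
  cases o1 with
  | none =>
    simp only [orE]
    rw [if_pos (by simp [PySem.Dict.getD_eq_get?_getD, PySem.Dict.get?_mk_cons])]
    apply PySem.Dict.ext
    simp [PySem.Dict.items_insert]
  | some a =>
    simp only [orE]
    rw [if_neg (by simp [PySem.Dict.getD_eq_get?_getD, PySem.Dict.get?_mk_cons])]

theorem step2 (p : List (String × String)) (o1 o2 o3 o4 o5 : Option (List (String × String)))
    (h1 : fcpC1 p = false) (h : fcpC2 p = true) :
    fcpStep (PySem.Dict.mk [("normal_pair", o1), ("solo_front", o2), ("solo_rear", o3), ("failed_front", o4), ("failed_rear", o5)]) p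
    = PySem.Dict.mk [("normal_pair", o1), ("solo_front", orE o2 (some p)), ("solo_rear", o3), ("failed_front", o4), ("failed_rear", o5)] := by
  simp only [fcpStep, cat2 p h1 h]
  cases o2 with
  | none =>
    simp only [orE]
    rw [if_pos (by simp [PySem.Dict.getD_eq_get?_getD, PySem.Dict.get?_mk_cons])]
    apply PySem.Dict.ext
    simp [PySem.Dict.items_insert]
  | some a =>
    simp only [orE]
    rw [if_neg (by simp [PySem.Dict.getD_eq_get?_getD, PySem.Dict.get?_mk_cons])]

theorem step3 (p : List (String × String)) (o1 o2 o3 o4 o5 : Option (List (String × String)))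
    (h1 : fcpC1 p = false) (h2 : fcpC2 p = false) (h : fcpC3 p = true) :
    fcpStep (PySem.Dict.mk [("normal_pair", o1), ("solo_front", o2), ("solo_rear", o3), ("failed_front", o4), ("failed_rear", o5)]) p
    = PySem.Dict.mk [("normal_pair", o1), ("solo_front", o2), ("solo_rear", orE o3 (some p)), ("failed_front", o4), ("failed_rear", o5)] := by
  simp only [fcpStep, cat3 p h1 h2 h]
  cases o3 with
  | none =>
    simp only [orE]
    rw [if_pos (by simp [PySem.Dict.getD_eq_get?_getD, PySem.Dict.get?_mk_cons])]
    apply PySem.Dict.ext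
    simp [PySem.Dict.items_insert]
  | some a =>
    simp only [orE]
    rw [if_neg (by simp [PySem.Dict.getD_eq_get?_getD, PySem.Dict.get?_mk_cons])]

theorem step4 (p : List (String × String)) (o1 o2 o3 o4 o5 : Option (List (String × String)))
    (h1 : fcpC1 p = false) (h2 : fcpC2 p = false) (h3 : fcpC3 p = false) (h : fcpC4 p = true) :
    fcpStep (PySem.Dict.mk [("normal_pair", o1), ("solo_front", o2), ("solo_rear", o3), ("failed_front", o4), ("failed_rear", o5)]) p
    = PySem.Dict.mk [("normal_pair", o1), ("solo_front", o2), ("solo_rear", o3), ("failed_front", orE o4 (some p)), ("failed_rear", o5)] := by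
  simp only [fcpStep, cat4 p h1 h2 h3 h]
  cases o4 with
  | none =>
    simp only [orE]
    rw [if_pos (by simp [PySem.Dict.getD_eq_get?_getD, PySem.Dict.get?_mk_cons])]
    apply PySem.Dict.ext
    simp [PySem.Dict.items_insert]
  | some a =>
    simp only [orE]
    rw [if_neg (by simp [PySem.Dict.getD_eq_get?_getD, PySem.Dict.get?_mk_cons])]

theorem step5 (p : List (String × String)) (o1 o2 o3 o4 o5 : Option (List (String × String)))
    (h1 : fcpC1 p = false) (h2 : fcpC2 p = false) (h3 : fcpC3 p = false) (h4 : fcpC4 p = false) (h : fcpC5 p = true) :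
    fcpStep (PySem.Dict.mk [("normal_pair", o1), ("solo_front", o2), ("solo_rear", o3), ("failed_front", o4), ("failed_rear", o5)]) p
    = PySem.Dict.mk [("normal_pair", o1), ("solo_front", o2), ("solo_rear", o3), ("failed_front", o4), ("failed_rear", orE o5 (some p))] := by
  simp only [fcpStep, cat5 p h1 h2 h3 h4 h]
  cases o5 with
  | none =>
    simp only [orE]
    rw [if_pos (by simp [PySem.Dict.getD_eq_get?_getD, PySem.Dict.get?_mk_cons])]
    apply PySem.Dict.ext
    simp [PySem.Dict.items_insert]
  | some a =>
    simp only [orE]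
    rw [if_neg (by simp [PySem.Dict.getD_eq_get?_getD, PySem.Dict.get?_mk_cons])]

theorem step0 (p : List (String × String)) (res : PySem.Dict String (Option (List (String × String))))
    (h1 : fcpC1 p = false) (h2 : fcpC2 p = false) (h3 : fcpC3 p = false) (h4 : fcpC4 p = false) (h5 : fcpC5 p = false) :
    fcpStep res p = res := by
  simp only [fcpStep, cat0 p h1 h2 h3 h4 h5]

-- 'o if not None else first later match' absorbs an immediate match
theorem orE_absorb (o x : Option (List (String × String))) (p : List (String × String)) :
    orE (orE o (some p)) x = orE o (some p) := by
  cases o <;> rfl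

-- loop invariant: folding B's step over ps, starting from slots o1..o5, yields each
-- slot unchanged if filled, else the first match of its condition in ps
theorem fcp_inv (ps : List (List (String × String))) (o1 o2 o3 o4 o5 : Option (List (String × String))) :
    (ps.foldl fcpStep (PySem.Dict.mk [("normal_pair", o1), ("solo_front", o2), ("solo_rear", o3), ("failed_front", o4), ("failed_rear", o5)])).items
    = [("normal_pair", orE o1 (ps.find? fcpC1)),
       ("solo_front", orE o2 (ps.find? fcpC2)),
       ("solo_rear", orE o3 (ps.find? fcpC3)),
       ("failed_front", orE o4 (ps.find? fcpC4)),
       ("failed_rear", orE o5 (ps.find? fcpC5))] := by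
  induction ps generalizing o1 o2 o3 o4 o5 with
  | nil => simp [orE_none_right]
  | cons p ps ih =>
    rw [List.foldl_cons]
    cases h1 : fcpC1 p with
    | true =>
      obtain ⟨e2, e3, e4, e5⟩ := excl1 p h1
      rw [step1 p _ _ _ _ _ h1, ih,
          List.find?_cons_of_pos h1, List.find?_cons_of_neg (by simp [e2]),
          List.find?_cons_of_neg (by simp [e3]), List.find?_cons_of_neg (by simp [e4]),
          List.find?_cons_of_neg (by simp [e5]), orE_absorb]
    | false =>
      cases h2 : fcpC2 p with
      | true =>
        obtain ⟨e1, e3, e4, e5⟩ := excl2 p h2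
        rw [step2 p _ _ _ _ _ h1 h2, ih,
            List.find?_cons_of_pos h2, List.find?_cons_of_neg (by simp [h1]),
            List.find?_cons_of_neg (by simp [e3]), List.find?_cons_of_neg (by simp [e4]),
            List.find?_cons_of_neg (by simp [e5]), orE_absorb]
      | false =>
        cases h3 : fcpC3 p with
        | true =>
          rw [step3 p _ _ _ _ _ h1 h2 h3, ih,
              List.find?_cons_of_pos h3, List.find?_cons_of_neg (by simp [h1]),
              List.find?_cons_of_neg (by simp [h2]),
              List.find?_cons_of_neg (by simp [(excl3 p h3).2.2.1]),
              List.find?_cons_of_neg (by simp [(excl3 p h3).2.2.2]), orE_absorb]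
        | false =>
          cases h4 : fcpC4 p with
          | true =>
            rw [step4 p _ _ _ _ _ h1 h2 h3 h4, ih,
                List.find?_cons_of_pos h4, List.find?_cons_of_neg (by simp [h1]),
                List.find?_cons_of_neg (by simp [h2]), List.find?_cons_of_neg (by simp [h3]),
                List.find?_cons_of_neg (by simp [(excl4 p h4).2.2.2]), orE_absorb]
          | false =>
            cases h5 : fcpC5 p with
            | true =>
              rw [step5 p _ _ _ _ _ h1 h2 h3 h4 h5, ih,
                  List.find?_cons_of_pos h5, List.find?_cons_of_neg (by simp [h1]),
                  List.find?_cons_of_neg (by simp [h2]), List.find?_cons_of_neg (by simp [h3]),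
                  List.find?_cons_of_neg (by simp [h4]), orE_absorb]
            | false =>
              rw [step0 p _ h1 h2 h3 h4 h5, ih,
                  List.find?_cons_of_neg (by simp [h1]), List.find?_cons_of_neg (by simp [h2]),
                  List.find?_cons_of_neg (by simp [h3]), List.find?_cons_of_neg (by simp [h4]),
                  List.find?_cons_of_neg (by simp [h5])]

-- ===== VERDICT (by name: the statement is the Claim_ definition above) =====
theorem find_camera_pairs_spec : Claim_equal_find_camera_pairs := by
  intro config _
  unfold Spec_find_camera_pairs find_camera_pairs find_camera_pairs_alt
  rw [fcp_inv]
  simp only [orE_none]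
  rfl
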